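-- pv_equiv track=rewrite | github.com/vinhbestever/summary-lesson | backend/app/main.py | _take_examples
-- ===== SOURCE A (Python) =====
-- def _take_examples(values: list[str], limit: int = 3) -> list[str]:
--     seen: set[str] = set()
--     deduped: list[str] = []
--     for value in values:
--         normalized = str(value).strip()
--         if not normalized or normalized in seen:
--             continue
--         seen.add(normalized)
--         deduped.append(normalized)
--         if len(deduped) >= limit:
--             break
--     return deduped
-- ===== SOURCE B (Python) =====
-- def _take_examples(values: list[str], limit: int = 3) -> list[str]:
--     deduped = dict.fromkeys(s for v in values if (s := str(v).strip()))
--     return list(deduped)[:max(limit, 0)]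
-- ===== Notes on version B (the rewrite author's own statement) =====
-- stated objective: idiomatic
-- what changed: Replaces the explicit seen-set loop with early break by a one-shot pipeline: strip+filter, dict.fromkeys ordered dedup, then a slice.
-- intended difference: For limit <= 0 with at least one non-blank value, A returns a one-element list (it appends before checking len >= limit) while B returns the empty list, the intended result of asking for at most zero examples. — e.g. on _take_examples(["x"], 0): A returns ["x"], B returns []
import Mathlib
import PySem

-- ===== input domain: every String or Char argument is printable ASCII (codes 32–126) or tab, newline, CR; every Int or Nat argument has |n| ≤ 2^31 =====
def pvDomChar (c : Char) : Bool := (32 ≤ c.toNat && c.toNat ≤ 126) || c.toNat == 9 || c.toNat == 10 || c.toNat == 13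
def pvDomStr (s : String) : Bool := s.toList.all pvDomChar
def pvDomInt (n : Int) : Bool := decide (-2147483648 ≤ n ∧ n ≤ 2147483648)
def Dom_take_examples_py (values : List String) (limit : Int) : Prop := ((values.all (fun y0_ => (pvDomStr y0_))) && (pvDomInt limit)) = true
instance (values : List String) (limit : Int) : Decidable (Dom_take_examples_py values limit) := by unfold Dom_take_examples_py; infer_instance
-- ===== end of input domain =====

-- B replaces A's explicit seen-set loop with dict.fromkeys ordered dedup plus a slice (idiomatic);
-- where the results differ (limit <= 0) B returns the intended empty list, stated in D_ below.

-- ===== PORT A =====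
def takeExamplesLoop (limit : Int) : List String → PySem.Set String → List String → List String
  | [], _, deduped => deduped
  | value :: rest, seen, deduped =>
    let normalized := PySem.Str.strip value
    if normalized = "" ∨ PySem.Set.contains seen normalized then
      takeExamplesLoop limit rest seen deduped
    else
      let seen' := PySem.Set.add seen normalized
      let deduped' := deduped ++ [normalized]
      if ((deduped'.length : Int) ≥ limit) then deduped'
      else takeExamplesLoop limit rest seen' deduped'

def take_examples_py (values : List String) (limit : Int) : List String :=
  takeExamplesLoop limit values PySem.Set.empty []

-- ===== PORT B =====
def take_examples_py_alt (values : List String) (limit : Int) : List String :=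
  let deduped := PySem.List.dedup ((values.map (fun v => PySem.Str.strip v)).filter (fun s => decide (s ≠ "")))
  -- list(deduped)[:max(limit, 0)] : a slice with a nonnegative stop is List.take
  deduped.take (max limit 0).toNat

-- ===== PRECONDITION & SPEC =====
-- On limit <= 0 with some non-blank value A returns a one-element list (it appends before checking
-- len >= limit) while B returns the intended empty list: a request for at most 0 examples yields none.
def D_take_examples_py (values : List String) (limit : Int) : Prop :=
  limit ≤ 0 ∧ ∃ v ∈ values, PySem.Str.strip v ≠ ""
instance (values : List String) (limit : Int) : Decidable (D_take_examples_py values limit) := by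
  unfold D_take_examples_py; infer_instance

def Spec_take_examples_py (values : List String) (limit : Int) (out : List String) : Prop :=
  ¬ D_take_examples_py values limit → out = take_examples_py_alt values limit
instance (values : List String) (limit : Int) (out : List String) : Decidable (Spec_take_examples_py values limit out) := by
  unfold Spec_take_examples_py; infer_instance

def pvDiffWitness_take_examples_py : List String × Int := (["x"], 0)
def pvDiffWitnessOut_take_examples_py : (List String) × (List String) := (["x"], [])

-- ===== CLAIM (what is proved, stated in full; the proofs are below) =====
def Claim_unchanged_take_examples_py : Prop := ∀ (values : List String) (limit : Int), Dom_take_examples_py values limit → Spec_take_examples_py values limit (take_examples_py values limit)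
def Claim_changed_take_examples_py : Prop := Dom_take_examples_py (pvDiffWitness_take_examples_py.1) (pvDiffWitness_take_examples_py.2) ∧ D_take_examples_py (pvDiffWitness_take_examples_py.1) (pvDiffWitness_take_examples_py.2) ∧ take_examples_py (pvDiffWitness_take_examples_py.1) (pvDiffWitness_take_examples_py.2) = pvDiffWitnessOut_take_examples_py.1 ∧ take_examples_py_alt (pvDiffWitness_take_examples_py.1) (pvDiffWitness_take_examples_py.2) = pvDiffWitnessOut_take_examples_py.2 ∧ pvDiffWitnessOut_take_examples_py.1 ≠ pvDiffWitnessOut_take_examples_py.2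
def Claim_exact_take_examples_py : Prop := ∀ (values : List String) (limit : Int), Dom_take_examples_py values limit → D_take_examples_py values limit → take_examples_py values limit ≠ take_examples_py_alt values limit

-- ===== LEMMAS AND PROOFS =====

def pvRemaining (deduped : List String) (values : List String) : List String :=
  (values.map (fun v => PySem.Str.strip v)).filter (fun s => decide (s ≠ "") && decide (s ∉ deduped))

lemma pv_filter_ofList (p : String → Bool) (t : List String) :
    List.filter p (PySem.Set.ofList t) = PySem.Set.ofList (List.filter p t) := by
  induction t with
  | nil => rfl
  | cons a t ih =>
    by_cases h : p a = true
    · simp only [PySem.Set.ofList_cons, List.filter_cons, h, if_true, PySem.Set.discard, ← ih,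
        List.filter_comm]
    · simp only [PySem.Set.ofList_cons, List.filter_cons, h, Bool.false_eq_true, if_false,
        PySem.Set.discard, ← ih, List.filter_filter]
      apply List.filter_congr
      intro x hx
      by_cases hxa : x = a
      · subst hxa; simp [h]
      · simp [hxa]

lemma pv_loop_eq (limit : Int) (values : List String) : ∀ (seen deduped : List String),
    (∀ s, s ∈ seen ↔ s ∈ deduped) → (deduped.length : Int) < limit →
    takeExamplesLoop limit values seen deduped =
      deduped ++ (PySem.Set.ofList (pvRemaining deduped values)).take (limit.toNat - deduped.length) := by
  induction values with
  | nil => intro seen deduped hmem hlt; simp [takeExamplesLoop, pvRemaining, PySem.Set.ofList]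
  | cons v rest ih =>
    intro seen deduped hmem hlt
    by_cases h1 : PySem.Str.strip v = ""
    · simp only [takeExamplesLoop, h1, true_or, if_true]
      rw [ih seen deduped hmem hlt]
      simp [pvRemaining, h1]
    · by_cases h2 : PySem.Str.strip v ∈ deduped
      · have hc : PySem.Set.contains seen (PySem.Str.strip v) = true :=
          by
          simp [PySem.Set.contains_eq_listContains]; exact (hmem _).mpr h2
        simp only [takeExamplesLoop, hc, or_true, if_true]
        rw [ih seen deduped hmem hlt]
        simp [pvRemaining, h1, h2]
      · have hns : PySem.Str.strip v ∉ seen := fun h => h2 ((hmem _).mp h)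
        have hc : PySem.Set.contains seen (PySem.Str.strip v) = false := by
          simp [PySem.Set.contains_eq_listContains]; exact hns
        simp only [takeExamplesLoop, hc, h1, Bool.false_eq_true, or_false, if_false,
          List.length_append, List.length_singleton]
        have hrem : pvRemaining deduped (v :: rest) =
            PySem.Str.strip v :: pvRemaining deduped rest := by
          simp [pvRemaining, h1, h2]
        rw [hrem, PySem.Set.ofList_cons]
        have hdis : PySem.Set.discard (PySem.Set.ofList (pvRemaining deduped rest)) (PySem.Str.strip v)
            = PySem.Set.ofList (pvRemaining (deduped ++ [PySem.Str.strip v]) rest) := by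
          show List.filter _ _ = _
          rw [pv_filter_ofList]
          congr 1
          unfold pvRemaining
          rw [List.filter_filter]
          apply List.filter_congr
          intro x hx
          by_cases hxn : x = PySem.Str.strip v
          · simp [hxn, h2]
          · by_cases hxd : x ∈ deduped <;> simp [hxn, hxd]
        rw [hdis]
        obtain ⟨m, hm⟩ : ∃ m, limit.toNat - deduped.length = m + 1 := ⟨limit.toNat - deduped.length - 1, by omega⟩
        rw [hm, List.take_succ_cons]
        by_cases h3 : (((deduped.length + 1 : Nat) : Int) ≥ limit)
        · have hm0 : m = 0 := by push_cast at h3; omega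
          rw [if_pos h3, hm0, List.take_zero]
        · rw [if_neg h3]
          push_cast at h3
          rw [ih (PySem.Set.add seen (PySem.Str.strip v)) (deduped ++ [PySem.Str.strip v])
            (fun s => by
              rw [PySem.Set.mem_add]
              simp only [List.mem_append, List.mem_singleton, hmem s]
              )
            (by simp; omega)]

          simp only [List.length_append, List.length_singleton, List.append_assoc,
            List.cons_append, List.nil_append]
          congr 3
          omega

lemma pv_loop_blank (limit : Int) (values : List String) : ∀ (seen deduped : List String),
    (∀ v ∈ values, PySem.Str.strip v = "") →
    takeExamplesLoop limit values seen deduped = deduped := by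
  induction values with
  | nil => intro seen deduped _; rfl
  | cons v rest ih =>
    intro seen deduped hall
    have h1 : PySem.Str.strip v = "" := hall v (by simp)
    simp only [takeExamplesLoop, h1, true_or, if_true]
    exact ih seen deduped (fun w hw => hall w (by simp [hw]))

lemma pv_loop_ne_nil (limit : Int) (values : List String)
    (hlim : limit ≤ 0) (hne : ∃ v ∈ values, PySem.Str.strip v ≠ "") :
    takeExamplesLoop limit values PySem.Set.empty [] ≠ [] := by
  induction values with
  | nil => simp at hne
  | cons v rest ih =>
    by_cases h1 : PySem.Str.strip v = ""
    · simp only [takeExamplesLoop, h1, true_or, if_true]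
      apply ih
      obtain ⟨w, hw, hwne⟩ := hne
      rcases List.mem_cons.mp hw with rfl | hw'
      · exact absurd h1 hwne
      · exact ⟨w, hw', hwne⟩
    · have hc : PySem.Set.contains PySem.Set.empty (PySem.Str.strip v) = false := by
        simp [PySem.Set.contains_eq_listContains, PySem.Set.empty]
      have h3 : (((([] : List String) ++ [PySem.Str.strip v]).length : Int) ≥ limit) := by
        simp; omega
      simp only [takeExamplesLoop, h1, hc, Bool.false_eq_true, or_self, if_false, h3, if_true]
      simp

-- ===== VERDICT (by name: the statement is the Claim_ definition above) =====
theorem take_examples_py_spec : Claim_unchanged_take_examples_py := by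
  intro values limit _ hnd
  unfold take_examples_py take_examples_py_alt
  by_cases hpos : 0 < limit
  · rw [pv_loop_eq limit values PySem.Set.empty []
      (fun s => by simp [PySem.Set.empty]) (by simpa using hpos)]
    have h1 : pvRemaining [] values =
        (values.map (fun v => PySem.Str.strip v)).filter (fun s => decide (s ≠ "")) := by
      unfold pvRemaining
      apply List.filter_congr
      intro x _; simp
    have h2 : (max limit 0).toNat = limit.toNat := by omega
    simp [h1, h2, PySem.List.dedup_eq_ofList]
  · have hall : ∀ v ∈ values, PySem.Str.strip v = "" := by
      by_contra hnot
      push Not at hnot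
      exact hnd ⟨by omega, hnot⟩
    rw [pv_loop_blank limit values PySem.Set.empty [] hall]
    have hfil : (values.map (fun v => PySem.Str.strip v)).filter (fun s => decide (s ≠ "")) = [] := by
      rw [List.filter_eq_nil_iff]
      intro s hs
      obtain ⟨v, hv, rfl⟩ := List.mem_map.mp hs
      simp [hall v hv]
    rw [hfil]
    simp [PySem.List.dedup]

theorem take_examples_py_changed : Claim_changed_take_examples_py := by
  unfold Claim_changed_take_examples_py; decide

theorem take_examples_py_tight : Claim_exact_take_examples_py := by
  intro values limit _ hD
  obtain ⟨hlim, hex⟩ := hD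
  have halt : take_examples_py_alt values limit = [] := by
    unfold take_examples_py_alt
    have : (max limit 0).toNat = 0 := by omega
    simp [this]
  rw [halt]
  exact pv_loop_ne_nil limit values hlim hex
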